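-- pv_equiv track=rewrite | github.com/lamarr-xai-group/anatomy-of-evidence | scripts/analyze_machine_explanations.py | is_prox
-- ===== SOURCE A (Python) =====
-- from itertools import groupby
--
-- def group_ids_to_spans(id_list):
--     """
--     Groups consecutive IDs into spans.
--     Returns: List of lists.
--     """
--     return [list(group) for _, group in groupby(id_list, key=lambda x: x - id_list.index(x))]
--
-- def is_in_sequence(seq, id_list):
--     """
--     Checks if any ID in the sequence is present in the provided ID list.
--     Args:
--         seq (list): Sequence of IDs to check.
--         id_list (list): List of IDs to check against.
--     Returns: bool - True if any ID in the sequence is found in the ID list, False otherwise.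
--     """
--     start_id = seq[0]
--     end_id = seq[-1]
--     for i in id_list:
--         if start_id <= i <= end_id:
--             return True
--     return False
--
-- def is_in_context(seqs, pred_id, context_window):
--     """
--     Checks if a predicted token ID is in a context window.
--     Args:
--         seqs (list): List of sequences (each a list of IDs).
--         pred_id (int): Predicted ID to check.
--         context_window (int): Size of the context window.
--     Returns: bool - True if the predicted token ID is in context window, False otherwise.
--     """
--     for seq in seqs:
--         start_id = seq[0] - context_window
--         end_id = seq[-1] + context_window
--         if start_id <= pred_id <= end_id:
--             return True
--     return False
--
-- def is_prox(gt, pred):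
--     """
--     Checks if the predicted IDs are proximate to the ground truth sequences.
--     Args:
--         gt (list): Ground truth list of token IDs.
--         pred (list): List of predicted token IDs.
--     Returns: bool - True if all predicted token IDs are in the context window of ground truth sequence, False otherwise.
--     """
--     # strong assumption: no broken sequences in ground truth
--     gt_sequences = group_ids_to_spans(gt)
--     # both for loops are required because the first makes sure that all sequences have a pred match
--     for span in gt_sequences:
--         # all sequences have at lease one predicted token match
--         if not is_in_sequence(span, pred):
--             return False
--     for pred_id in pred:
--         # if there is one id in pred which is not in a context window of the sequences then false
--         if not is_in_context(gt_sequences, pred_id, 10):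
--             return False
--     # all ids are in a context window of a sequence
--     return True
-- ===== SOURCE B (Python) =====
-- from bisect import bisect_left, bisect_right
--
-- def is_prox(gt, pred):
--     # Spans: first-occurrence index dict + one linear fold into (start, end) pairs.
--     first = {}
--     for i, x in enumerate(gt):
--         first.setdefault(x, i)
--     spans = []
--     prev_key = None
--     for x in gt:
--         k = x - first[x]
--         if spans and k == prev_key:
--             spans[-1][1] = x
--         else:
--             spans.append([x, x])
--         prev_key = k
--     ps = sorted(pred)
--     # every span must contain a predicted id: one binary search per span
--     for s, e in spans:
--         j = bisect_left(ps, s)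
--         if j == len(ps) or ps[j] > e:
--             return False
--     # every predicted id must lie in some expanded span [s-10, e+10]:
--     # sort expanded spans by start, prefix-max the ends, one binary search per id
--     ivs = sorted(((s - 10, e + 10) for s, e in spans), key=lambda iv: iv[0])
--     los = [lo for lo, _ in ivs]
--     premax = []
--     for _, hi in ivs:
--         premax.append(hi if not premax else max(premax[-1], hi))
--     for p in ps:
--         j = bisect_right(los, p)
--         if j == 0 or premax[j - 1] < p:
--             return False
--     return True
-- ===== Notes on version B (the rewrite author's own statement) =====
-- stated objective: faster
-- what changed: A groups gt with itertools.groupby whose key calls list.index per element (quadratic) and then runs two nested containment scans (each span over all of pred, each pred over all spans); B builds spans in one linear fold over a first-occurrence dict and replaces both nested scans by sort-based queries: a binary search in sorted(pred) per span, and per predicted id a binary search over the expanded spans sorted by start combined with a prefix-maximum of their ends.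
import Mathlib
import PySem

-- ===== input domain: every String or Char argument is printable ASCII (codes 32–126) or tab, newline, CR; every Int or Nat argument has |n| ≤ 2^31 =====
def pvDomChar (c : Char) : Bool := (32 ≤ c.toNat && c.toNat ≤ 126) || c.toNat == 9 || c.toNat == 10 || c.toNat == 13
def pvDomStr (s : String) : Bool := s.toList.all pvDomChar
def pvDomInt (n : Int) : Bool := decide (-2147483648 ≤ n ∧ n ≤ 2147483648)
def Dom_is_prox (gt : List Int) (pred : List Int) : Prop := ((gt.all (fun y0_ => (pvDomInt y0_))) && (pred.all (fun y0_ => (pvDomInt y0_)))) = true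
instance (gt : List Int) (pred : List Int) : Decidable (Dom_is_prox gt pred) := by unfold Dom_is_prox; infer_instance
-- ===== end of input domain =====

-- B replaces A's quadratic groupby-with-list.index grouping and the two nested containment
-- scans by a linear span fold plus sort-based queries: a binary search in sorted(pred) per
-- span, and a binary search over start-sorted expanded spans with a prefix-maximum of ends
-- per predicted id (objective: faster).

-- ===== PORT A =====
-- key of itertools.groupby: x - gt.index(x); x always occurs in gt, so index? is some
def pvKeyA (gt : List Int) (x : Int) : Int :=
  x - (((PySem.List.index? gt x).getD 0 : Nat) : Int)

-- itertools.groupby: chunk consecutive pairs with equal key, collect the values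
def pyGroupAux : Int → List Int → List (Int × Int) → List (List Int)
  | _, acc, [] => [acc.reverse]
  | k, acc, (k', v) :: rest =>
      if k' = k then pyGroupAux k (v :: acc) rest
      else acc.reverse :: pyGroupAux k' [v] rest

def group_ids_to_spans (gt : List Int) : List (List Int) :=
  match gt.map (fun x => (pvKeyA gt x, x)) with
  | [] => []
  | (k, v) :: rest => pyGroupAux k [v] rest

-- seq[0] / seq[-1]; every seq this is called on is nonempty (a groupby group), so the
-- headD/getLastD defaults are unreachable (Python would raise IndexError on [])
def is_in_sequence (seq : List Int) (id_list : List Int) : Bool :=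
  id_list.any (fun i => seq.headD 0 ≤ i && i ≤ seq.getLastD 0)

def is_in_context (seqs : List (List Int)) (pred_id : Int) (context_window : Int) : Bool :=
  seqs.any (fun seq =>
    seq.headD 0 - context_window ≤ pred_id && pred_id ≤ seq.getLastD 0 + context_window)

def is_prox (gt : List Int) (pred : List Int) : Bool :=
  (group_ids_to_spans gt).all (fun span => is_in_sequence span pred) &&
  pred.all (fun pred_id => is_in_context (group_ids_to_spans gt) pred_id 10)

-- ===== PORT B =====
-- first-occurrence index dict: for i, x in enumerate(gt): first.setdefault(x, i)
def pvFirstIdx (gt : List Int) : PySem.Dict Int Int :=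
  (PySem.List.enumerate gt 0).foldl (fun d p => d.setdefault p.2 p.1) PySem.Dict.empty

-- loop body of B's span pass; state = (spans, newest first, and prev_key);
-- κ x = x - first[x] (the key is always present, so getD's default is unreachable)
def pvStep (κ : Int → Int) (st : List (Int × Int) × Option Int) (x : Int) :
    List (Int × Int) × Option Int :=
  match st with
  | ((s, e) :: rest, some pk) =>
      if κ x = pk then ((s, x) :: rest, some (κ x))
      else ((x, x) :: (s, e) :: rest, some (κ x))
  | (ivs, _) => ((x, x) :: ivs, some (κ x))

def pvIntervals (gt : List Int) : List (Int × Int) :=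
  ((gt.foldl (pvStep (fun x => x - (pvFirstIdx gt).getD x 0)) ([], none)).1).reverse

-- the expanded spans (s-10, e+10) sorted by start, their starts, and the prefix maxima of
-- their ends (the premax list is appended to on the left and reversed, as a foldl)
def pvIvs (gt : List Int) : List (Int × Int) :=
  PySem.List.sorted ((pvIntervals gt).map (fun iv => (iv.1 - 10, iv.2 + 10))) (fun iv => iv.1) false

def pvLos (gt : List Int) : List Int := (pvIvs gt).map (fun iv => iv.1)

def pvPremax (gt : List Int) : List Int :=
  ((pvIvs gt).foldl
    (fun acc iv => (match acc with | [] => iv.2 | m :: _ => max m iv.2) :: acc) []).reverse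

-- ps[j] is only read behind the short-circuit j != len(ps), so getD's default is unreachable
def is_prox_alt (gt : List Int) (pred : List Int) : Bool :=
  (pvIntervals gt).all (fun iv =>
    !(PySem.List.bisectLeft (PySem.List.sorted pred (fun p => p) false) iv.1
        == (PySem.List.sorted pred (fun p => p) false).length
      || decide (iv.2 < (PySem.List.sorted pred (fun p => p) false).getD
           (PySem.List.bisectLeft (PySem.List.sorted pred (fun p => p) false) iv.1) 0))) &&
  (PySem.List.sorted pred (fun p => p) false).all (fun p =>
    !(PySem.List.bisectRight (pvLos gt) p == 0
      || decide ((pvPremax gt).getD (PySem.List.bisectRight (pvLos gt) p - 1) 0 < p)))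

-- ===== PRECONDITION & SPEC =====
def Spec_is_prox (gt : List Int) (pred : List Int) (out : Bool) : Prop := out = is_prox_alt gt pred
instance (gt : List Int) (pred : List Int) (out : Bool) : Decidable (Spec_is_prox gt pred out) := by unfold Spec_is_prox; infer_instance

-- ===== CLAIM (what is proved, stated in full; the proofs are below) =====
def Claim_equal_is_prox : Prop := ∀ (gt : List Int) (pred : List Int), Dom_is_prox gt pred → Spec_is_prox gt pred (is_prox gt pred)

-- ===== LEMMAS AND PROOFS =====

-- B's setdefault loop realises list.index: a lookup is the first-occurrence position
lemma get?_setdefault_fold (l : List Int) : ∀ (s : Int) (d : PySem.Dict Int Int) (x : Int),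
    ((PySem.List.enumerate l s).foldl (fun d p => d.setdefault p.2 p.1) d).get? x
      = (d.get? x).or ((PySem.List.index? l x).map (fun i => s + (i : Int))) := by
  induction l with
  | nil => intro s d x; simp [PySem.List.enumerate]
  | cons y t ih =>
    intro s d x
    rw [PySem.List.enumerate_cons, List.foldl_cons, ih]
    by_cases hxy : x = y
    · subst hxy
      rw [PySem.List.index?_cons_self]
      rw [PySem.Dict.get?_setdefault_self]
      cases hd : d.get? x <;> simp
    · rw [PySem.List.index?_cons_of_ne _ (Ne.symm hxy)]
      rw [PySem.Dict.get?_setdefault_of_ne _ _ hxy]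
      cases hd : d.get? x <;> cases hi : PySem.List.index? t x <;>
        first
        | (simp; ring)
        | simp

lemma firstIdx_getD (gt : List Int) (x : Int) (hx : x ∈ gt) :
    (pvFirstIdx gt).getD x 0 = (((PySem.List.index? gt x).getD 0 : Nat) : Int) := by
  obtain ⟨i, hi⟩ := Option.isSome_iff_exists.mp ((PySem.List.index?_isSome_iff gt x).mpr hx)
  rw [PySem.Dict.getD_eq_get?_getD, pvFirstIdx, get?_setdefault_fold, hi]
  simp [PySem.Dict.get?_empty]

-- B's span fold computes exactly (head, last) of each group A's groupby builds
lemma fold_groups (κ : Int → Int) (l : List Int) :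
    ∀ (k : Int) (acc : List Int), acc ≠ [] → ∀ (ivs : List (Int × Int)),
    (l.foldl (pvStep κ) ((acc.getLastD 0, acc.headD 0) :: ivs, some k)).1
      = ((pyGroupAux k acc (l.map (fun x => (κ x, x)))).map
          (fun g => (g.headD 0, g.getLastD 0))).reverse ++ ivs := by
  induction l with
  | nil =>
    intro k acc hacc ivs
    simp [pyGroupAux]
  | cons x t ih =>
    intro k acc hacc ivs
    rw [List.foldl_cons]
    by_cases hk : κ x = k
    · have hstep : pvStep κ ((acc.getLastD 0, acc.headD 0) :: ivs, some k) x
          = (((x :: acc).getLastD 0, (x :: acc).headD 0) :: ivs, some k) := by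
        cases acc with
        | nil => exact absurd rfl hacc
        | cons a t' =>
          simp [pvStep, hk, List.getLastD_eq_getLast?, List.getLast?_cons]
      rw [hstep, ih k (x :: acc) (by simp) ivs]
      simp [pyGroupAux, hk]
    · have hstep : pvStep κ ((acc.getLastD 0, acc.headD 0) :: ivs, some k) x
          = (([x].getLastD 0, [x].headD 0) :: ((acc.getLastD 0, acc.headD 0) :: ivs), some (κ x)) := by
        simp [pvStep, hk]
      rw [hstep, ih (κ x) [x] (by simp) ((acc.getLastD 0, acc.headD 0) :: ivs)]
      simp [pyGroupAux, hk]

lemma intervals_eq (gt : List Int) :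
    pvIntervals gt = (group_ids_to_spans gt).map (fun g => (g.headD 0, g.getLastD 0)) := by
  unfold pvIntervals
  have hcong : gt.foldl (pvStep (fun x => x - (pvFirstIdx gt).getD x 0)) ([], none)
      = gt.foldl (pvStep (pvKeyA gt)) ([], none) := by
    apply PySem.List.foldl_congr_mem
    intro st x hx
    have hx' : (fun x => x - (pvFirstIdx gt).getD x 0) x = pvKeyA gt x := by
      simp only [pvKeyA, firstIdx_getD gt x hx]
    simp only [pvStep, hx']
  rw [hcong]
  cases gt with
  | nil => simp [group_ids_to_spans]
  | cons x rest =>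
    rw [List.foldl_cons]
    have hstep : pvStep (pvKeyA (x :: rest)) ([], none) x
        = (([x].getLastD 0, [x].headD 0) :: [], some (pvKeyA (x :: rest) x)) := by
      simp [pvStep]
    rw [hstep, fold_groups (pvKeyA (x :: rest)) rest (pvKeyA (x :: rest) x) [x] (by simp) []]
    simp [group_ids_to_spans]

-- prefix maxima, structurally (proof-side mirror of B's premax loop)
def pmax : Int → List Int → List Int
  | _, [] => []
  | m, h :: t => max m h :: pmax (max m h) t

lemma foldl_pmax : ∀ (t : List Int) (m : Int) (acc : List Int),
    t.foldl (fun acc h => (match acc with | [] => h | m :: _ => max m h) :: acc) (m :: acc)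
      = (pmax m t).reverse ++ (m :: acc) := by
  intro t
  induction t with
  | nil => intro m acc; simp [pmax]
  | cons h t ih =>
    intro m acc
    rw [List.foldl_cons]
    show t.foldl _ (max m h :: m :: acc) = _
    rw [ih (max m h) (m :: acc)]
    simp [pmax]

-- B's premax list, structurally: first end, then running maxima
def premaxList : List Int → List Int
  | [] => []
  | h :: t => h :: pmax h t

lemma pmax_le_iff : ∀ (t : List Int) (m p : Int) (j : Nat), j < t.length →
    (p ≤ (pmax m t).getD j 0 ↔ p ≤ m ∨ ∃ i, ∃ _ : i < t.length, i ≤ j ∧ p ≤ t[i]) := by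
  intro t
  induction t with
  | nil => intro m p j hj; simp at hj
  | cons h t ih =>
    intro m p j hj
    cases j with
    | zero =>
      simp only [pmax, List.getD_cons_zero, le_max_iff]
      constructor
      · rintro (hm | hh)
        · exact Or.inl hm
        · exact Or.inr ⟨0, by simp, by simp, by simpa using hh⟩
      · rintro (hm | ⟨i, hi, hij, hpi⟩)
        · exact Or.inl hm
        · interval_cases i
          exact Or.inr (by simpa using hpi)
    | succ j =>
      simp only [pmax, List.getD_cons_succ]
      rw [ih (max m h) p j (by simpa using hj)]
      constructor
      · rintro (hmh | ⟨i, hi, hij, hpi⟩)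
        · rcases le_max_iff.mp hmh with hm | hh
          · exact Or.inl hm
          · exact Or.inr ⟨0, by simp, by omega, by simpa using hh⟩
        · exact Or.inr ⟨i + 1, by simpa using hi, by omega, by simpa using hpi⟩
      · rintro (hm | ⟨i, hi, hij, hpi⟩)
        · exact Or.inl (le_max_iff.mpr (Or.inl hm))
        · cases i with
          | zero => exact Or.inl (le_max_iff.mpr (Or.inr (by simpa using hpi)))
          | succ i => exact Or.inr ⟨i, by simpa using hi, by omega, by simpa using hpi⟩

-- B's premax list is the running maxima over the list of expanded ends
lemma premax_eq (gt : List Int) :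
    pvPremax gt = premaxList ((pvIvs gt).map (fun iv => iv.2)) := by
  unfold pvPremax
  have h1 : (pvIvs gt).foldl
      (fun acc iv => (match acc with | [] => iv.2 | m :: _ => max m iv.2) :: acc) []
      = ((pvIvs gt).map (fun iv => iv.2)).foldl
          (fun acc h => (match acc with | [] => h | m :: _ => max m h) :: acc) [] := by
    rw [List.foldl_map]
  rw [h1]
  cases hm : (pvIvs gt).map (fun iv => iv.2) with
  | nil => rfl
  | cons h t =>
    rw [List.foldl_cons]
    change (List.foldl (fun (acc : List Int) (h : Int) =>
        (match acc with | [] => h | m :: tail => max m h) :: acc) (h :: []) t).reverse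
        = premaxList (h :: t)
    rw [foldl_pmax t h []]
    simp [premaxList]

-- check 1, pointwise: the bisect_left test on sorted(pred) is A's is_in_sequence scan
lemma check1_eq (pred : List Int) (s e : Int) :
    (!(PySem.List.bisectLeft (PySem.List.sorted pred (fun p => p) false) s
        == (PySem.List.sorted pred (fun p => p) false).length
      || decide (e < (PySem.List.sorted pred (fun p => p) false).getD
           (PySem.List.bisectLeft (PySem.List.sorted pred (fun p => p) false) s) 0)))
      = pred.any (fun i => s ≤ i && i ≤ e) := by
  have hpw : (PySem.List.sorted pred (fun p => p) false).Pairwise (· ≤ ·) := by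
    simpa using PySem.List.sorted_pairwise pred (fun p => p)
  set ps := PySem.List.sorted pred (fun p => p) false with hps
  obtain ⟨hle, hlt, hge⟩ := PySem.List.bisectLeft_spec ps s hpw
  set j := PySem.List.bisectLeft ps s with hj
  rw [Bool.eq_iff_iff]
  simp only [Bool.not_eq_eq_eq_not, Bool.not_true, Bool.or_eq_false_iff, beq_eq_false_iff_ne,
    decide_eq_false_iff_not, not_lt, List.any_eq_true, Bool.and_eq_true, decide_eq_true_eq]
  constructor
  · rintro ⟨hjne, hje⟩
    have hjlt : j < ps.length := lt_of_le_of_ne hle hjne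
    refine ⟨ps[j], ?_, hge j hjlt le_rfl, ?_⟩
    · exact (PySem.List.mem_sorted pred (fun p => p) false ps[j]).mp (List.getElem_mem hjlt)
    · rwa [List.getD_eq_getElem ps 0 hjlt] at hje
  · rintro ⟨p, hp, hsp, hpe⟩
    have hp' : p ∈ ps := (PySem.List.mem_sorted pred (fun p => p) false p).mpr hp
    obtain ⟨i, hi, rfl⟩ := List.mem_iff_getElem.mp hp'
    have hji : j ≤ i := by
      by_contra hc
      exact absurd (hlt i hi (by omega)) (not_lt.mpr hsp)
    have hjlt : j < ps.length := lt_of_le_of_lt hji hi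
    refine ⟨by omega, ?_⟩
    rw [List.getD_eq_getElem ps 0 hjlt]
    calc ps[j] ≤ ps[i] := by
          rcases eq_or_lt_of_le hji with h | h
          · simp [h]
          · exact List.pairwise_iff_getElem.mp hpw j i hjlt hi h
      _ ≤ e := hpe

lemma premaxList_le_iff : ∀ (his : List Int) (p : Int) (k : Nat), k < his.length →
    (p ≤ (premaxList his).getD k 0 ↔ ∃ i, ∃ _ : i < his.length, i ≤ k ∧ p ≤ his[i]) := by
  intro his p k hk
  cases his with
  | nil => simp at hk
  | cons h t =>
    cases k with
    | zero =>
      simp only [premaxList, List.getD_cons_zero]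
      constructor
      · intro hp; exact ⟨0, by simp, by simp, by simpa using hp⟩
      · rintro ⟨i, hi, hik, hpi⟩
        interval_cases i
        simpa using hpi
    | succ k =>
      simp only [premaxList, List.getD_cons_succ]
      rw [pmax_le_iff t h p k (by simpa using hk)]
      constructor
      · rintro (hh | ⟨i, hi, hik, hpi⟩)
        · exact ⟨0, by simp, by omega, by simpa using hh⟩
        · exact ⟨i + 1, by simpa using hi, by omega, by simpa using hpi⟩
      · rintro ⟨i, hi, hik, hpi⟩
        cases i with
        | zero => exact Or.inl (by simpa using hpi)
        | succ i => exact Or.inr ⟨i, by simpa using hi, by omega, by simpa using hpi⟩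

-- check 2, pointwise: the bisect_right + prefix-max test over start-sorted expanded spans
-- is A's is_in_context scan
lemma check2_eq (gt : List Int) (p : Int) :
    (!(PySem.List.bisectRight (pvLos gt) p == 0
      || decide ((pvPremax gt).getD (PySem.List.bisectRight (pvLos gt) p - 1) 0 < p)))
      = (pvIntervals gt).any (fun iv => iv.1 - 10 ≤ p && p ≤ iv.2 + 10) := by
  have hpw : (pvLos gt).Pairwise (· ≤ ·) := by
    simpa [pvLos] using
      PySem.List.sorted_map_key_pairwise ((pvIntervals gt).map (fun iv => (iv.1 - 10, iv.2 + 10)))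
        (fun iv => iv.1)
  obtain ⟨hle, hlo, hhi⟩ := PySem.List.bisectRight_spec (pvLos gt) p hpw
  set j := PySem.List.bisectRight (pvLos gt) p with hj
  have hlen : (pvLos gt).length = (pvIvs gt).length := by simp [pvLos]
  have hpm : pvPremax gt = premaxList ((pvIvs gt).map (fun iv => iv.2)) := premax_eq gt
  have hlosget : ∀ (i : Nat) (h : i < (pvIvs gt).length),
      (pvLos gt)[i]'(by rwa [hlen]) = (pvIvs gt)[i].1 := by
    intro i h; simp [pvLos]
  rw [Bool.eq_iff_iff]
  simp only [Bool.not_eq_eq_eq_not, Bool.not_true, Bool.or_eq_false_iff, beq_eq_false_iff_ne,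
    decide_eq_false_iff_not, not_lt, List.any_eq_true, Bool.and_eq_true, decide_eq_true_eq]
  have hiff : (∃ iv ∈ pvIntervals gt, iv.1 - 10 ≤ p ∧ p ≤ iv.2 + 10)
      ↔ ∃ i, ∃ _ : i < (pvIvs gt).length, (pvIvs gt)[i].1 ≤ p ∧ p ≤ (pvIvs gt)[i].2 := by
    constructor
    · rintro ⟨iv, hiv, h1, h2⟩
      have hm : (iv.1 - 10, iv.2 + 10) ∈ pvIvs gt :=
        (PySem.List.mem_sorted _ _ _ _).mpr (List.mem_map.mpr ⟨iv, hiv, rfl⟩)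
      obtain ⟨i, hi, he⟩ := List.mem_iff_getElem.mp hm
      exact ⟨i, hi, by rw [he]; exact ⟨h1, h2⟩⟩
    · rintro ⟨i, hi, h1, h2⟩
      obtain ⟨iv, hiv, he⟩ :=
        List.mem_map.mp ((PySem.List.mem_sorted _ _ _ _).mp (List.getElem_mem hi))
      have he' : (pvIvs gt)[i] = ((iv.1 - 10 : Int), (iv.2 + 10 : Int)) := he.symm
      rw [he'] at h1 h2
      exact ⟨iv, hiv, by simpa using h1, by simpa using h2⟩
  rw [hiff]
  constructor
  · rintro ⟨hjne, hjp⟩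
    have hj1 : j - 1 < ((pvIvs gt).map (fun iv => iv.2)).length := by
      simp only [List.length_map, ← hlen]; omega
    rw [hpm] at hjp
    obtain ⟨i, hi, hik, hpi⟩ := (premaxList_le_iff _ p (j - 1) hj1).mp hjp
    have hi' : i < (pvIvs gt).length := by simpa using hi
    refine ⟨i, hi', ?_, by simpa using hpi⟩
    have hij : i < j := by omega
    have := hlo i (by omega) hij
    rwa [hlosget i hi'] at this
  · rintro ⟨i, hi, h1, h2⟩
    have hij : i < j := by
      by_contra hc
      have := hhi i (by omega) (by omega)
      rw [hlosget i hi] at this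
      omega
    refine ⟨by omega, ?_⟩
    rw [hpm]
    refine (premaxList_le_iff _ p (j - 1) (by simp only [List.length_map, ← hlen]; omega)).mpr
      ⟨i, by simpa using hi, by omega, by simpa using h2⟩

-- all() over sorted(pred) is all() over pred (a permutation)
lemma all_sorted_eq (pred : List Int) (f : Int → Bool) :
    (PySem.List.sorted pred (fun p => p) false).all f = pred.all f := by
  rw [Bool.eq_iff_iff]
  simp only [List.all_eq_true]
  constructor <;> intro h x hx
  · exact h x ((PySem.List.mem_sorted pred (fun p => p) false x).mpr hx)
  · exact h x ((PySem.List.mem_sorted pred (fun p => p) false x).mp hx)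

-- ===== VERDICT (by name: the statement is the Claim_ definition above) =====
theorem is_prox_spec : Claim_equal_is_prox := by
  intro gt pred _
  unfold Spec_is_prox is_prox is_prox_alt
  simp only [check1_eq pred, check2_eq gt, all_sorted_eq]
  rw [intervals_eq gt]
  simp [List.all_map, List.any_map, is_in_sequence, is_in_context, Function.comp_def]
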